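-- pv_equiv track=rewrite | github.com/allenwind/tensorflow-crf | task_pos_bilstm_crf.py | find_poss
-- ===== SOURCE A (Python) =====
-- def find_poss(text, tags):
--     # POS标注使用BMES
--     # 根据标签提取文本中的实体
--     def segment_by_tags(text, tags):
--         buf = ""
--         plabel = None
--         for tag, char in zip(tags, text):
--             tag, label = tag.split("-", 1)
--             if tag == "B" or tag == "S":
--                 if buf:
--                     yield buf, plabel
--                 buf = char
--             else:
--                 # M or E
--                 buf += char
--             plabel = label
--
--         if buf:
--             yield buf, plabel
--     return list(segment_by_tags(text, tags))
-- ===== SOURCE B (Python) =====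
-- def find_poss(text, tags):
--     # Parse once into (tag_type, label, char) triples, then cut at segment
--     # starts with an index scan; label of a segment = label of its last char.
--     parsed = []
--     for tag, char in zip(tags, text):
--         t, label = tag.split("-", 1)
--         parsed.append((t, label, char))
--     res = []
--     i, n = 0, len(parsed)
--     while i < n:
--         j = i + 1
--         while j < n and parsed[j][0] != "B" and parsed[j][0] != "S":
--             j += 1
--         res.append(("".join(p[2] for p in parsed[i:j]), parsed[j - 1][1]))
--         i = j
--     return res
-- ===== Notes on version B (the rewrite author's own statement) =====
-- stated objective: alternative
-- what changed: Replaces the generator with a mutable buffer/previous-label state by a two-phase pass: parse all tags into (type,label,char) triples, then cut the parsed list at B/S starts and emit each slice joined with the label of its last element.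
import Mathlib
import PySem

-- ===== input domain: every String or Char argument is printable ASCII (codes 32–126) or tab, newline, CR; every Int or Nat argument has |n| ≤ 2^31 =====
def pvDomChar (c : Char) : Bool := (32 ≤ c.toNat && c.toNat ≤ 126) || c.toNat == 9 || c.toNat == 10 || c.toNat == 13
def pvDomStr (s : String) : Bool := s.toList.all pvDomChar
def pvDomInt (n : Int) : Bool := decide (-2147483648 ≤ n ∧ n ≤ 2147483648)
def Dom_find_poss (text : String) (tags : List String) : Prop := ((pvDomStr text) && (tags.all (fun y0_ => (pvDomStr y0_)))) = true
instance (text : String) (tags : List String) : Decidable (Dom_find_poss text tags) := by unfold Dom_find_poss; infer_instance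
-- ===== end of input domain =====

-- B replaces A's generator with buffer/previous-label state by a two-phase pass
-- (parse all tags, then cut the parsed list at B/S starts): alternative decomposition, same cost.


-- ===== PORT A =====
-- `t, label = tag.split("-", 1)`: when '-' does not occur Python raises ValueError
-- (excluded by Pre_); the ("", "") default there is never claimed about.
def splitTag (tag : String) : String × String :=
  match PySem.Str.splitMax? tag "-" 1 with
  | some [a, b] => (a, b)
  | _ => ("", "")

-- the generator's loop: state = (buf, plabel, emitted so far); buf as List Char,
-- plabel's initial Python value None is never yielded (buf is empty then), ported as "".
def loopA : List (String × Char) → List Char → String → List (String × String) → List (String × String)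
  | [], buf, plabel, acc =>
      if buf ≠ [] then acc ++ [(String.ofList buf, plabel)] else acc
  | (tag, char) :: rest, buf, plabel, acc =>
      if (splitTag tag).1 = "B" ∨ (splitTag tag).1 = "S" then
        loopA rest [char] (splitTag tag).2
          (if buf ≠ [] then acc ++ [(String.ofList buf, plabel)] else acc)
      else
        loopA rest (buf ++ [char]) (splitTag tag).2 acc

def find_poss (text : String) (tags : List String) : List (String × String) :=
  loopA (tags.zip text.toList) [] "" []

-- ===== PORT B =====
-- phase 1: parse every zipped (tag, char) into (tag_type, label, char)
def parseB (ps : List (String × Char)) : List (String × String × Char) :=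
  ps.map (fun p => ((splitTag p.1).1, (splitTag p.1).2, p.2))

-- phase 2: outer while loop = recursion on the remaining parsed list; the inner
-- `while j < n and parsed[j][0] not in ("B","S")` scan = takeWhile; segment =
-- join of the slice's chars, its label = parsed[j-1][1] (last element of the slice).
def segsB : List (String × String × Char) → List (String × String)
  | [] => []
  | p :: rest =>
      let grp := rest.takeWhile (fun q => ¬(q.1 = "B" ∨ q.1 = "S"))
      (String.ofList ((p :: grp).map (fun q => q.2.2)), ((grp.getLastD p).2.1))
        :: segsB (rest.drop grp.length)
  termination_by l => l.length
  decreasing_by simp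

def find_poss_alt (text : String) (tags : List String) : List (String × String) :=
  segsB (parseB (tags.zip text.toList))

-- ===== PRECONDITION & SPEC =====
-- Pre_ excludes exactly the inputs on which A raises ValueError: some tag within
-- the zip-truncated prefix contains no '-' (B raises there as well).
def Pre_find_poss (text : String) (tags : List String) : Prop :=
  ∀ p ∈ tags.zip text.toList, '-' ∈ p.1.toList
instance (text : String) (tags : List String) : Decidable (Pre_find_poss text tags) := by
  unfold Pre_find_poss; infer_instance

def pvWitness_find_poss : String × List String := ("abc", ["B-n", "E-n", "S-v"])

def Spec_find_poss (text : String) (tags : List String) (out : List (String × String)) : Prop := out = find_poss_alt text tags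
instance (text : String) (tags : List String) (out : List (String × String)) : Decidable (Spec_find_poss text tags out) := by unfold Spec_find_poss; infer_instance

-- ===== CLAIM (what is proved, stated in full; the proofs are below) =====
def Claim_equal_find_poss : Prop := ∀ (text : String) (tags : List String), Dom_find_poss text tags → Pre_find_poss text tags → Spec_find_poss text tags (find_poss text tags)

-- ===== LEMMAS AND PROOFS =====

-- A's loop on the already-parsed list (proof-only reformulation)
def loopA' : List (String × String × Char) → List Char → String → List (String × String) → List (String × String)
  | [], buf, plabel, acc =>
      if buf ≠ [] then acc ++ [(String.ofList buf, plabel)] else acc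
  | (t, label, char) :: rest, buf, plabel, acc =>
      if t = "B" ∨ t = "S" then
        loopA' rest [char] label (if buf ≠ [] then acc ++ [(String.ofList buf, plabel)] else acc)
      else
        loopA' rest (buf ++ [char]) label acc

def predB (q : String × String × Char) : Bool := decide ¬(q.1 = "B" ∨ q.1 = "S")

theorem segsB_nil : segsB [] = [] := segsB.eq_1

theorem segsB_cons (p : String × String × Char) (rest : List (String × String × Char)) :
    segsB (p :: rest) =
      (String.ofList ((p :: rest.takeWhile predB).map (fun q => q.2.2)),
        ((rest.takeWhile predB).getLastD p).2.1)
      :: segsB (rest.drop (rest.takeWhile predB).length) := segsB.eq_2 p rest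

theorem loopA'_nil (buf : List Char) (pl : String) (acc : List (String × String)) :
    loopA' [] buf pl acc = if buf ≠ [] then acc ++ [(String.ofList buf, pl)] else acc := rfl

theorem loopA'_cons (t label : String) (char : Char) (rest : List (String × String × Char))
    (buf : List Char) (pl : String) (acc : List (String × String)) :
    loopA' ((t, label, char) :: rest) buf pl acc =
      if t = "B" ∨ t = "S" then
        loopA' rest [char] label (if buf ≠ [] then acc ++ [(String.ofList buf, pl)] else acc)
      else
        loopA' rest (buf ++ [char]) label acc := rfl

theorem loopA_cons (tag : String) (char : Char) (rest : List (String × Char))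
    (buf : List Char) (pl : String) (acc : List (String × String)) :
    loopA ((tag, char) :: rest) buf pl acc =
      if (splitTag tag).1 = "B" ∨ (splitTag tag).1 = "S" then
        loopA rest [char] (splitTag tag).2
          (if buf ≠ [] then acc ++ [(String.ofList buf, pl)] else acc)
      else
        loopA rest (buf ++ [char]) (splitTag tag).2 acc := rfl

theorem loopA_eq_parsed (l : List (String × Char)) (buf : List Char) (pl : String)
    (acc : List (String × String)) :
    loopA l buf pl acc = loopA' (parseB l) buf pl acc := by
  induction l generalizing buf pl acc with
  | nil => rfl
  | cons p rest ih =>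
      obtain ⟨tag, char⟩ := p
      show loopA ((tag, char) :: rest) buf pl acc
          = loopA' (((splitTag tag).1, (splitTag tag).2, char) :: parseB rest) buf pl acc
      rw [loopA_cons, loopA'_cons]
      by_cases hs : (splitTag tag).1 = "B" ∨ (splitTag tag).1 = "S"
      · rw [if_pos hs, if_pos hs, ih]
      · rw [if_neg hs, if_neg hs, ih]

theorem loopA'_acc (l : List (String × String × Char)) (buf : List Char) (pl : String)
    (acc : List (String × String)) :
    loopA' l buf pl acc = acc ++ loopA' l buf pl [] := by
  induction l generalizing buf pl acc with
  | nil => by_cases h : buf = [] <;> simp [loopA'_nil, h]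
  | cons q rest ih =>
      obtain ⟨t, label, char⟩ := q
      by_cases hs : t = "B" ∨ t = "S"
      · rw [loopA'_cons, loopA'_cons, if_pos hs, if_pos hs,
          ih [char] label (if buf ≠ [] then acc ++ [(String.ofList buf, pl)] else acc),
          ih [char] label (if buf ≠ [] then [] ++ [(String.ofList buf, pl)] else [])]
        by_cases h : buf = [] <;> simp [h, List.append_assoc]
      · rw [loopA'_cons, loopA'_cons, if_neg hs, if_neg hs, ih (buf ++ [char]) label acc]

theorem getLastD_snd_fst (l : List (String × String × Char)) (p : String × String × Char) :
    (l.getLastD p).2.1 = (l.map (fun q => q.2.1)).getLastD p.2.1 := by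
  induction l generalizing p with
  | nil => rfl
  | cons a l ih => simp only [List.getLastD_cons, List.map_cons, ih a]

theorem loopA'_open (l : List (String × String × Char)) (buf : List Char) (pl : String)
    (h : buf ≠ []) :
    loopA' l buf pl [] =
      (String.ofList (buf ++ (l.takeWhile predB).map (fun q => q.2.2)),
        ((l.takeWhile predB).map (fun q => q.2.1)).getLastD pl)
      :: segsB (l.drop (l.takeWhile predB).length) := by
  induction l generalizing buf pl with
  | nil => simp [loopA'_nil, h, segsB_nil]
  | cons q rest ih =>
      obtain ⟨t, label, char⟩ := q
      by_cases hs : t = "B" ∨ t = "S"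
      · rw [loopA'_cons, if_pos hs, if_pos h, List.nil_append,
          loopA'_acc rest [char] label, ih [char] label (by simp),
          List.takeWhile_cons_of_neg (by simp [predB, hs])]
        simp only [List.map_nil, List.getLastD_nil, List.append_nil, List.length_nil,
          List.drop_zero]
        rw [segsB_cons (t, label, char) rest, getLastD_snd_fst]
        simp
      · rw [loopA'_cons, if_neg hs, ih (buf ++ [char]) label (by simp),
          List.takeWhile_cons_of_pos (by simp [predB, hs])]
        simp only [List.map_cons, List.getLastD_cons, List.length_cons, List.drop_succ_cons,
          List.append_assoc, List.singleton_append]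

theorem seg_head (t lab : String) (c : Char) (rest : List (String × String × Char)) :
    loopA' rest [c] lab [] = segsB ((t, lab, c) :: rest) := by
  rw [loopA'_open rest [c] lab (by simp), segsB_cons (t, lab, c) rest, getLastD_snd_fst]
  simp

theorem loopA'_empty (l : List (String × String × Char)) :
    loopA' l [] "" [] = segsB l := by
  cases l with
  | nil => exact segsB_nil.symm
  | cons q rest =>
      obtain ⟨t, label, char⟩ := q
      by_cases hs : t = "B" ∨ t = "S"
      · rw [loopA'_cons, if_pos hs]
        simp only [ne_eq, not_true_eq_false, if_false]
        exact seg_head t label char rest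
      · rw [loopA'_cons, if_neg hs, List.nil_append]
        exact seg_head t label char rest

-- ===== VERDICT (by name: the statement is the Claim_ definition above) =====
theorem find_poss_spec : Claim_equal_find_poss := by
  intro text tags _ _
  unfold Spec_find_poss find_poss find_poss_alt
  rw [loopA_eq_parsed]
  exact loopA'_empty _
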